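-- pv_equiv track=rewrite | github.com/Juro0/adventofcode | 2025/day-3.py | first_part
-- ===== SOURCE A (Python) =====
-- def first_part(puzzle_input):
--
--     r = 0
--
--     for battery in puzzle_input:
--
--         # keep the largest digit that is NOT in the last position
--         max_digit = max(battery[:-1])
--         max_digit_i = battery.index(max_digit)
--
--         # keep the largest digit that is after the first largest digit
--         max2_digit = max(battery[(max_digit_i+1):])
--
--         r += (max_digit * 10) + max2_digit
--
--     return r
-- ===== SOURCE B (Python) =====
-- def first_part(puzzle_input):
--     r = 0
--     for battery in puzzle_input:
--         n = len(battery)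
--         m, m2 = battery[0], None
--         for k in range(1, n):
--             x = battery[k]
--             if k < n - 1 and x > m:
--                 m, m2 = x, None
--             else:
--                 m2 = x if m2 is None else max(m2, x)
--         r += 10 * m + m2
--     return r
-- ===== Notes on version B (the rewrite author's own statement) =====
-- stated objective: alternative
-- what changed: Replaces A's three scans per battery (max over battery[:-1], list.index to find its first position, then max over the suffix) with a single left-to-right pass that maintains the running max over non-last elements and the running max of elements seen after it.
import Mathlib
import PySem

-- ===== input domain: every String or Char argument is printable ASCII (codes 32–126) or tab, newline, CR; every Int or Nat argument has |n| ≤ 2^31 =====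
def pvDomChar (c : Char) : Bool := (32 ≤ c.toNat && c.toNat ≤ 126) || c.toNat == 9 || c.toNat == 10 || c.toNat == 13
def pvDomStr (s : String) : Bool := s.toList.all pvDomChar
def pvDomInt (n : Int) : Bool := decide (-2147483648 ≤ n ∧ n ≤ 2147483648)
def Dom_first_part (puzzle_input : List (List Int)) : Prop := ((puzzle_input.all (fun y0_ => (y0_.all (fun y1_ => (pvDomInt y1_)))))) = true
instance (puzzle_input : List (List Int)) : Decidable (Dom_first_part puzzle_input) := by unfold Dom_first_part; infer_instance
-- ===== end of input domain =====

-- B replaces A's three scans per battery (max of prefix, list.index, max of suffix)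
-- by a single left-to-right pass carrying the running max and the running max-after-it;
-- objective: alternative (one pass instead of three, same asymptotic cost).


-- ===== PORT A =====
-- one iteration of A's loop body; the `none` branches are Python's ValueError
-- (max() of an empty slice), excluded by Pre_first_part
def firstPartStep (r : Int) (battery : List Int) : Int :=
  match PySem.List.max? (PySem.List.slice battery none (some (-1))) (fun y => y) with
  | none => r
  | some max_digit =>
    match PySem.List.index? battery max_digit with
    | none => r
    | some max_digit_i =>
      match PySem.List.max? (PySem.List.slice battery (some ((max_digit_i : Int) + 1)) none) (fun y => y) with
      | none => r
      | some max2_digit => r + (max_digit * 10 + max2_digit)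

def first_part (puzzle_input : List (List Int)) : Int :=
  puzzle_input.foldl firstPartStep 0

-- ===== PORT B =====
-- B's loop body for index k: x = battery[k]; update (m, m2) as in Source B
def altStep (n : Nat) (battery : List Int) (st : Int × Option Int) (k : Int) : Int × Option Int :=
  let x := PySem.List.pyGetD battery k 0
  if k < (n : Int) - 1 ∧ st.1 < x then (x, none)
  else (st.1, some (match st.2 with | none => x | some y => max y x))

-- one iteration of B's outer loop; `[]` is Python's IndexError on battery[0] and
-- `(_, none)` the TypeError on 10*m + None — both excluded by Pre_first_part
def altBattery (r : Int) (battery : List Int) : Int :=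
  match battery with
  | [] => r
  | b0 :: _ =>
    match (PySem.List.pyRange 1 (battery.length : Int) 1).foldl
            (altStep battery.length battery) (b0, none) with
    | (m, some m2) => r + (10 * m + m2)
    | (_, none) => r

def first_part_alt (puzzle_input : List (List Int)) : Int :=
  puzzle_input.foldl altBattery 0

-- ===== PRECONDITION & SPEC =====
-- A calls max() on battery[:-1]; on a battery of length ≤ 1 that slice is empty and
-- Python raises ValueError, so exactly those inputs are excluded.
def Pre_first_part (puzzle_input : List (List Int)) : Prop :=
  ∀ battery ∈ puzzle_input, 2 ≤ battery.length
instance (puzzle_input : List (List Int)) : Decidable (Pre_first_part puzzle_input) := by unfold Pre_first_part; infer_instance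

def pvWitness_first_part : List (List Int) := [[3, 1, 4], [2, 7]]

def Spec_first_part (puzzle_input : List (List Int)) (out : Int) : Prop := out = first_part_alt puzzle_input
instance (puzzle_input : List (List Int)) (out : Int) : Decidable (Spec_first_part puzzle_input out) := by unfold Spec_first_part; infer_instance

-- ===== CLAIM (what is proved, stated in full; the proofs are below) =====
def Claim_equal_first_part : Prop := ∀ (puzzle_input : List (List Int)), Dom_first_part puzzle_input → Pre_first_part puzzle_input → Spec_first_part puzzle_input (first_part puzzle_input)

-- ===== LEMMAS AND PROOFS =====

-- proof-side recursion: B's inner loop phrased structurally on the remaining list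
-- (m = running max over non-last elements seen, m2 = running max after m's position)
def altGo (m : Int) (m2 : Option Int) : List Int → Int × Option Int
  | [] => (m, m2)
  | x :: rest =>
    if rest ≠ [] ∧ m < x then altGo x none rest
    else altGo m (some (match m2 with | none => x | some y => max y x)) rest

-- running max folded into an optional accumulator (mirror of B's m2 update)
def accOpt : Option Int → List Int → Option Int
  | o, [] => o
  | none, x :: l => accOpt (some x) l
  | some y, x :: l => accOpt (some (max y x)) l

-- closed form of altGo's second component
def m2spec (m : Int) (m2 : Option Int) (rest : List Int) : Option Int :=
  let M := rest.dropLast.foldl max m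
  if m < M then PySem.List.max? (rest.drop (rest.idxOf M + 1)) (fun y => y)
  else accOpt m2 rest

theorem accOpt_some (l : List Int) : ∀ y : Int, accOpt (some y) l = some (l.foldl max y) := by
  induction l with
  | nil => intro y; rfl
  | cons x l ih => intro y; simpa [accOpt] using ih (max y x)

theorem idxOf?_eq_some_idxOf (a : Int) (l : List Int) (h : a ∈ l) :
    l.idxOf? a = some (l.idxOf a) := by
  induction l with
  | nil => simp at h
  | cons b l ih =>
    by_cases hb : b = a
    · subst hb; simp [List.idxOf?_cons, List.idxOf_cons_self]
    · rw [List.idxOf_cons_ne _ hb]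
      simp only [List.idxOf?_cons, beq_iff_eq, hb, if_false]
      rw [ih (by rcases List.mem_cons.mp h with h1 | h1; exact absurd h1.symm hb; exact h1)]
      rfl

theorem altGo_spec (rest : List Int) : ∀ (m : Int) (m2 : Option Int),
    altGo m m2 rest = (rest.dropLast.foldl max m, m2spec m m2 rest) := by
  induction rest with
  | nil => intro m m2; simp [altGo, m2spec, accOpt]
  | cons x rest' ih =>
    intro m m2
    by_cases hre : rest' = []
    · subst hre
      cases m2 <;> simp [altGo, m2spec, accOpt]
    · by_cases hx : m < x
      · rw [show altGo m m2 (x :: rest') = altGo x none rest' by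
          simp [altGo, hre, hx]]
        rw [ih x none]
        have hM : (x :: rest'.dropLast).foldl max m = rest'.dropLast.foldl max x := by
          simp [List.foldl_cons, max_eq_right hx.le]
        have hMc : (x :: rest').dropLast.foldl max m = rest'.dropLast.foldl max x := by
          rw [List.dropLast_cons_of_ne_nil hre]; exact hM
        refine Prod.ext hMc.symm ?_
        show m2spec x none rest' = m2spec m m2 (x :: rest')
        simp only [m2spec, List.dropLast_cons_of_ne_nil hre]
        rw [hM]
        have hxM : x ≤ rest'.dropLast.foldl max x := (PySem.List.le_foldl_max rest'.dropLast x).1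
        have hmM : m < rest'.dropLast.foldl max x := lt_of_lt_of_le hx hxM
        rw [if_pos hmM]
        by_cases hxM' : x < rest'.dropLast.foldl max x
        · rw [if_pos hxM', List.idxOf_cons_ne _ (ne_of_lt hxM')]
          rfl
        · have hMx : rest'.dropLast.foldl max x = x := le_antisymm (not_lt.mp hxM') hxM
          rw [if_neg hxM', hMx, List.idxOf_cons_self]
          simp only [List.drop_succ_cons, List.drop_zero]
          obtain ⟨y, t, rfl⟩ := List.exists_cons_of_ne_nil hre
          rw [PySem.List.max?_id_cons]
          show accOpt (some y) t = some (t.foldl max y)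
          rw [accOpt_some]
      · rw [show altGo m m2 (x :: rest') =
              altGo m (some (match m2 with | none => x | some y => max y x)) rest' by
          simp [altGo, hx]]
        rw [ih]
        have hmx : max m x = m := max_eq_left (not_lt.mp hx)
        have hM : (x :: rest'.dropLast).foldl max m = rest'.dropLast.foldl max m := by
          simp [List.foldl_cons, hmx]
        have hMc : (x :: rest').dropLast.foldl max m = rest'.dropLast.foldl max m := by
          rw [List.dropLast_cons_of_ne_nil hre]; exact hM
        refine Prod.ext hMc.symm ?_
        show m2spec m _ rest' = m2spec m m2 (x :: rest')
        simp only [m2spec, List.dropLast_cons_of_ne_nil hre]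
        rw [hM]
        by_cases hmM : m < rest'.dropLast.foldl max m
        · rw [if_pos hmM, if_pos hmM,
              List.idxOf_cons_ne _ (ne_of_lt (lt_of_le_of_lt (not_lt.mp hx) hmM))]
          rfl
        · rw [if_neg hmM, if_neg hmM]
          cases m2 <;> rfl

-- A's loop body in canonical form: the three scans reduced to the running max M
-- and the max over the elements after M's first position
theorem firstPartStep_canon (r b0 : Int) (rest : List Int) (hre : rest ≠ []) :
    firstPartStep r (b0 :: rest) =
      (match PySem.List.max? ((b0 :: rest).drop ((b0 :: rest).idxOf (rest.dropLast.foldl max b0) + 1)) (fun y => y) with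
       | none => r
       | some m2 => r + (rest.dropLast.foldl max b0 * 10 + m2)) := by
  have hmem : rest.dropLast.foldl max b0 ∈ b0 :: rest := by
    rcases PySem.List.foldl_max_mem rest.dropLast b0 with h1 | h1
    · rw [h1]; exact List.mem_cons_self
    · exact List.mem_cons_of_mem _ (List.mem_of_mem_dropLast h1)
  unfold firstPartStep
  rw [PySem.List.slice_to_neg_one, List.dropLast_cons_of_ne_nil hre,
      PySem.List.max?_id_cons]
  show (match PySem.List.index? (b0 :: rest) (rest.dropLast.foldl max b0) with
        | none => r
        | some max_digit_i =>
          match PySem.List.max? (PySem.List.slice (b0 :: rest) (some ((max_digit_i : Int) + 1)) none) (fun y => y) with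
          | none => r
          | some max2_digit => r + (rest.dropLast.foldl max b0 * 10 + max2_digit)) = _
  rw [PySem.List.index?_eq_idxOf?, idxOf?_eq_some_idxOf _ _ hmem]
  show (match PySem.List.max? (PySem.List.slice (b0 :: rest) (some (((b0 :: rest).idxOf (rest.dropLast.foldl max b0) : Int) + 1)) none) (fun y => y) with
        | none => r
        | some max2_digit => r + (rest.dropLast.foldl max b0 * 10 + max2_digit)) = _
  rw [show (((b0 :: rest).idxOf (rest.dropLast.foldl max b0) : Int) + 1) =
        (((b0 :: rest).idxOf (rest.dropLast.foldl max b0) + 1 : Nat) : Int) by push_cast; ring]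
  rw [PySem.List.slice_from_natCast]


-- B's index loop from position k equals the structural recursion on battery.drop k
theorem foldl_altStep_eq_altGo (battery : List Int) :
    ∀ (j k : Nat) (st : Int × Option Int), j = battery.length - k → 1 ≤ k →
      (PySem.List.pyRange (k : Int) (battery.length : Int) 1).foldl
          (altStep battery.length battery) st
        = altGo st.1 st.2 (battery.drop k) := by
  intro j
  induction j with
  | zero =>
    intro k st hj hk
    have hlen : battery.length ≤ k := by omega
    rw [PySem.List.pyRange_one_eq_nil (by exact_mod_cast hlen),
        List.drop_eq_nil_of_le hlen]
    rfl
  | succ j ih =>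
    intro k st hj hk
    have hkl : k < battery.length := by omega
    rw [PySem.List.pyRange_one_cons (by exact_mod_cast hkl)]
    rw [List.foldl_cons]
    have hdrop : battery.drop k = battery[k] :: battery.drop (k + 1) :=
      (List.getElem_cons_drop hkl).symm
    have hx : PySem.List.pyGetD battery (k : Int) 0 = battery[k] :=
      PySem.List.pyGetD_ofNat battery k 0 hkl
    have hcond : ((k : Int) < (battery.length : Int) - 1) ↔ battery.drop (k + 1) ≠ [] := by
      rw [ne_eq, List.drop_eq_nil_iff]
      constructor
      · intro h1 h2; omega
      · intro h1; omega
    have hrest : ((k : Int) + 1) = ((k + 1 : Nat) : Int) := by push_cast; ring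
    rw [hrest, ih (k + 1) _ (by omega) (by omega), hdrop]
    show altGo _ _ _ = altGo st.1 st.2 (battery[k] :: battery.drop (k + 1))
    rw [show altGo st.1 st.2 (battery[k] :: battery.drop (k + 1)) =
          (if battery.drop (k + 1) ≠ [] ∧ st.1 < battery[k] then
            altGo battery[k] none (battery.drop (k + 1))
          else altGo st.1
            (some (match st.2 with | none => battery[k] | some y => max y battery[k]))
            (battery.drop (k + 1))) from rfl]
    unfold altStep
    rw [hx]
    by_cases hc : battery.drop (k + 1) ≠ [] ∧ st.1 < battery[k]
    · rw [if_pos hc, if_pos ⟨hcond.mpr hc.1, hc.2⟩]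
    · rw [if_neg hc, if_neg (fun h1 => hc ⟨hcond.mp h1.1, h1.2⟩)]

theorem step_eq (r : Int) (battery : List Int) (h : 2 ≤ battery.length) :
    firstPartStep r battery = altBattery r battery := by
  obtain ⟨b0, rest, rfl⟩ : ∃ b0 rest, battery = b0 :: rest := by
    cases battery with
    | nil => simp at h
    | cons a t => exact ⟨a, t, rfl⟩
  have hre : rest ≠ [] := by
    intro e; subst e; simp at h
  rw [firstPartStep_canon r b0 rest hre]
  show _ = altBattery r (b0 :: rest)
  unfold altBattery
  show _ = (match (PySem.List.pyRange ((1 : Nat) : Int) ((b0 :: rest).length : Int) 1).foldl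
                (altStep (b0 :: rest).length (b0 :: rest)) (b0, none) with
            | (m, some m2) => r + (10 * m + m2)
            | (_, none) => r)
  rw [foldl_altStep_eq_altGo (b0 :: rest) ((b0 :: rest).length - 1) 1 (b0, none) rfl le_rfl]
  show _ = (match altGo b0 none rest with
            | (m, some m2) => r + (10 * m + m2)
            | (_, none) => r)
  rw [altGo_spec]
  have hb0M : b0 ≤ rest.dropLast.foldl max b0 := (PySem.List.le_foldl_max rest.dropLast b0).1
  by_cases hlt : b0 < rest.dropLast.foldl max b0
  · -- the prefix max is attained strictly after b0
    rw [List.idxOf_cons_ne _ (ne_of_lt hlt), List.drop_succ_cons]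
    rw [show m2spec b0 none rest =
          PySem.List.max? (rest.drop (rest.idxOf (rest.dropLast.foldl max b0) + 1)) (fun y => y) by
      simp only [m2spec, if_pos hlt]]
    cases PySem.List.max? (rest.drop (rest.idxOf (rest.dropLast.foldl max b0) + 1)) (fun y => y) with
    | none => rfl
    | some m2 => show r + _ = r + _; ring
  · -- b0 itself is the prefix max
    have hMb : rest.dropLast.foldl max b0 = b0 := le_antisymm (not_lt.mp hlt) hb0M
    rw [show m2spec b0 none rest = accOpt none rest by
      simp only [m2spec, if_neg hlt]]
    rw [hMb, List.idxOf_cons_self, List.drop_succ_cons, List.drop_zero]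
    obtain ⟨y, t, rfl⟩ := List.exists_cons_of_ne_nil hre
    rw [PySem.List.max?_id_cons]
    rw [show accOpt none (y :: t) = some (t.foldl max y) from accOpt_some t y]
    show r + _ = r + _
    ring

theorem foldl_steps (l : List (List Int)) : ∀ r : Int, (∀ b ∈ l, 2 ≤ b.length) →
    l.foldl firstPartStep r = l.foldl altBattery r := by
  induction l with
  | nil => intro r _; rfl
  | cons b l ih =>
    intro r hpre
    simp only [List.foldl_cons]
    rw [step_eq r b (hpre b (List.mem_cons_self))]
    exact ih _ (fun c hc => hpre c (List.mem_cons_of_mem _ hc))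

-- ===== VERDICT (by name: the statement is the Claim_ definition above) =====
theorem first_part_spec : Claim_equal_first_part := by
  intro l _ hpre
  unfold Spec_first_part first_part first_part_alt
  exact foldl_steps l 0 hpre
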